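-- pv_equiv track=rewrite | github.com/kanghana1/coding-test-study | Baesuyeon_zone/week04/BOJ/BOJ_1946.py | final_member
-- ===== SOURCE A (Python) =====
-- def final_member(applicants):
--     applicants.sort() # 서류 기준으로 오름차순 정렬
--     count = 1  # 첫 번째 지원자는 무조건 통과(서류 1등일테니까..)
--     min_interview = applicants[0][1]
--
--     for i in range(1, len(applicants)): #모든 신청자 체킹
--         # 현재 면접 순위가 지금까지 최소보다 더 좋으면 통과 (+1)
--         if applicants[i][1] < min_interview:
--             count += 1
--             min_interview = applicants[i][1]
--
--     return count
-- ===== SOURCE B (Python) =====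
-- def final_member(applicants):
--     applicants.sort()
--     ranks = [a[1] for a in applicants]
--     run = []
--     cur = ranks[0]
--     for r in ranks:
--         cur = min(cur, r)
--         run.append(cur)
--     return 1 + sum(1 for prev, nxt in zip(run, run[1:]) if nxt < prev)
-- ===== Notes on version B (the rewrite author's own statement) =====
-- stated objective: alternative
-- what changed: Replaces the incremental count-and-min single pass with materialising the interview-rank column and its running-minimum table, then counting strict decreases between adjacent table entries.
import Mathlib
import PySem

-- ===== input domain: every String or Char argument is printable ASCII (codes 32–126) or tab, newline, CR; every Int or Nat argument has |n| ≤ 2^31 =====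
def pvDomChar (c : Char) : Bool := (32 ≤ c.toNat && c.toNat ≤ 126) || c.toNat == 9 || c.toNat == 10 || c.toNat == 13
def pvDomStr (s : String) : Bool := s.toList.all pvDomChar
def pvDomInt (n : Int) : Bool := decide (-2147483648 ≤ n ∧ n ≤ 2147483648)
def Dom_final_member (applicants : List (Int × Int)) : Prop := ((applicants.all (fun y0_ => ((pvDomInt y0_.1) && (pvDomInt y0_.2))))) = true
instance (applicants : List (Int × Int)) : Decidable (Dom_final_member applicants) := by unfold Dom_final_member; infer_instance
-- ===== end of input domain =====

-- B materialises the running-minimum table of the interview ranks and counts adjacent strict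
-- decreases, instead of A's incremental count+min pass (objective: alternative).
-- Both Pythons sort `applicants` in place; the equivalence proved here is about the return value
-- (the mutation is identical in A and B).

-- ===== PORT A =====
def final_member (applicants : List (Int × Int)) : Int :=
  let s := PySem.List.sorted2 applicants (fun x => x.1) (fun x => x.2) false
  match s with
  | [] => 0   -- unreachable under Pre_ (Python raises IndexError on [])
  | a0 :: rest =>
    (rest.foldl (fun (st : Int × Int) ai =>
      if ai.2 < st.2 then (st.1 + 1, ai.2) else st) (1, a0.2)).1

-- ===== PORT B =====
def final_member_alt (applicants : List (Int × Int)) : Int :=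
  let s := PySem.List.sorted2 applicants (fun x => x.1) (fun x => x.2) false
  let ranks := s.map Prod.snd
  match ranks with
  | [] => 0   -- unreachable under Pre_ (Python raises IndexError on [])
  | r0 :: _ =>
    let run := (ranks.foldl (fun (st : Int × List Int) r =>
        let cur := min st.1 r; (cur, st.2 ++ [cur])) (r0, ([] : List Int))).2
    1 + ((run.zip run.tail).filter (fun (p : Int × Int) => decide (p.2 < p.1))).length

-- ===== PRECONDITION & SPEC =====
-- Pre_ excludes only the empty list, on which Python A raises IndexError (applicants[0][1]).
def Pre_final_member (applicants : List (Int × Int)) : Prop := applicants ≠ []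
instance (applicants : List (Int × Int)) : Decidable (Pre_final_member applicants) := by unfold Pre_final_member; infer_instance
def pvWitness_final_member : (List (Int × Int)) := [(3, 2), (1, 4), (2, 1)]
def Spec_final_member (applicants : List (Int × Int)) (out : Int) : Prop := out = final_member_alt applicants
instance (applicants : List (Int × Int)) (out : Int) : Decidable (Spec_final_member applicants out) := by unfold Spec_final_member; infer_instance

-- ===== CLAIM (what is proved, stated in full; the proofs are below) =====
def Claim_equal_final_member : Prop := ∀ (applicants : List (Int × Int)), Dom_final_member applicants → Pre_final_member applicants → Spec_final_member applicants (final_member applicants)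

-- ===== LEMMAS AND PROOFS =====

-- number of strict new minima of l, starting from current minimum m
def pvD (m : Int) : List Int → Nat
  | [] => 0
  | r :: t => if r < m then 1 + pvD r t else pvD m t

-- the running-minimum table of l continued from current minimum m
def pvRun (m : Int) : List Int → List Int
  | [] => []
  | r :: t => min m r :: pvRun (min m r) t

theorem pvA_fold (l : List (Int × Int)) : ∀ (c m : Int),
    (l.foldl (fun (st : Int × Int) ai =>
      if ai.2 < st.2 then (st.1 + 1, ai.2) else st) (c, m)).1
      = c + (pvD m (l.map Prod.snd) : Int) := by
  induction l with
  | nil => intro c m; simp [pvD]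
  | cons a t ih =>
    intro c m
    by_cases h : a.2 < m <;> simp [pvD, h, ih, Int.add_assoc]

theorem pvB_fold (l : List Int) : ∀ (m : Int) (acc : List Int),
    (l.foldl (fun (st : Int × List Int) r =>
        let cur := min st.1 r; (cur, st.2 ++ [cur])) (m, acc)).2
      = acc ++ pvRun m l := by
  induction l with
  | nil => intro m acc; simp [pvRun]
  | cons r t ih => intro m acc; simp [pvRun, ih]

def pvZC (l : List Int) : Nat := ((l.zip l.tail).filter (fun (p : Int × Int) => decide (p.2 < p.1))).length

theorem pvZC_run (t : List Int) : ∀ (m : Int), pvZC (m :: pvRun m t) = pvD m t := by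
  induction t with
  | nil => intro m; simp [pvRun, pvD, pvZC]
  | cons r t' ih =>
    intro m
    by_cases h : r < m
    · have hmin : min m r = r := min_eq_right (le_of_lt h)
      simp [pvRun, pvD, pvZC, hmin, h, ← ih r, pvZC, Nat.add_comm]
    · have hmin : min m r = m := min_eq_left (by omega)
      simp [pvRun, pvD, pvZC, hmin, h, ← ih m, pvZC]

-- ===== VERDICT (by name: the statement is the Claim_ definition above) =====
theorem final_member_spec : Claim_equal_final_member := by
  intro applicants _ _
  unfold Spec_final_member final_member final_member_alt
  cases hs : PySem.List.sorted2 applicants (fun x => x.1) (fun x => x.2) false with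
  | nil => simp
  | cons a0 rest =>
    simp only [List.map_cons]
    rw [pvA_fold, pvB_fold]
    have : min a0.2 a0.2 = a0.2 := min_self _
    simp only [pvRun, this, List.nil_append]
    have := pvZC_run (rest.map Prod.snd) a0.2
    unfold pvZC at this
    simp only [List.tail_cons] at this ⊢
    rw [this]
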